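-- pv_equiv track=rewrite | github.com/animit-kulkarni/image-captioning-tensorflow | tokenize_captions.py | _reformat_img_name_vectors
-- ===== SOURCE A (Python) =====
-- import collections
--
-- def _reformat_img_name_vectors(caption_filename_tuple, caption_vector):
--
--     img_name_vector = [x[1] for x in caption_filename_tuple]
--
--     # Instantiate a dictionary to hold filename and corresponding preprocessed caption tokens
--     image_caption_dict = collections.defaultdict(list)
--     # This is a dict that initialises a new key with an empty list value: {a: {}, b:[] ...}
--     for file, caption in zip(img_name_vector, caption_vector):
--         image_caption_dict[file].append(caption)
--
--     img_names_list = [] # this will contain a list of lists i.e. 5 of same img since 5 captions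
--     for img_name, caption_list in image_caption_dict.items():
--         num_captions = len(caption_list)
--         img_names_list.extend([img_name] * num_captions)
--
--     assert len(img_names_list) == len(caption_vector), 'Something went wrong in the img_name_vector reformatting'
--     return img_names_list
-- ===== SOURCE B (Python) =====
-- def _reformat_img_name_vectors(caption_filename_tuple, caption_vector):
--     # rank-and-stable-sort: tag every (filename, caption) pair, rank filenames by
--     # first appearance, then stably sort the pairs by rank and project filenames
--     pairs = list(zip([x[1] for x in caption_filename_tuple], caption_vector))
--     order = {}
--     for f, _ in pairs:
--         order.setdefault(f, len(order))
--     img_names_list = [f for f, _ in sorted(pairs, key=lambda p: order[p[0]])]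
--     assert len(img_names_list) == len(caption_vector), 'Something went wrong in the img_name_vector reformatting'
--     return img_names_list
-- ===== Notes on version B (the rewrite author's own statement) =====
-- stated objective: alternative
-- what changed: B never groups captions in a dict of lists: it tags each (filename, caption) pair, assigns every filename its first-appearance rank with order.setdefault, and stably sorts the pairs by that rank, projecting out the filenames; correctness rests on sort stability, not on dict grouping.
import Mathlib
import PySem

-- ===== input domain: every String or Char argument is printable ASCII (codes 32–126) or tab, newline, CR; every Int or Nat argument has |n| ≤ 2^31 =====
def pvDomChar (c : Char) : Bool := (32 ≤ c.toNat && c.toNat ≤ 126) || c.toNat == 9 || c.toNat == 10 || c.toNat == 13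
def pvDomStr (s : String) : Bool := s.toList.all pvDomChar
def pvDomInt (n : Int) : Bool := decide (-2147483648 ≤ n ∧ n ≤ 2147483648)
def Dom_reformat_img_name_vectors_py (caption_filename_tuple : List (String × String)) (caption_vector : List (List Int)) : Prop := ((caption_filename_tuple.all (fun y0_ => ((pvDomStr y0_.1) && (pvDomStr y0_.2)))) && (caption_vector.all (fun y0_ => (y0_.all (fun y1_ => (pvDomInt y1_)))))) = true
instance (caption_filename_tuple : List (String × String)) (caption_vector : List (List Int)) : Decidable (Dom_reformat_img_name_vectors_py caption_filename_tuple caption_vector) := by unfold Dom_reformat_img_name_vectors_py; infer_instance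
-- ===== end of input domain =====

-- B regroups by tagging pairs with a first-appearance rank and stably sorting by it, instead of A's dict of caption lists (alternative decomposition; return value only).


-- ===== PORT A =====
def reformat_img_name_vectors_py (caption_filename_tuple : List (String × String)) (caption_vector : List (List Int)) : List String :=
  let img_name_vector := caption_filename_tuple.map (fun x => x.2)
  -- defaultdict(list); d[file].append(caption) is d.modify file [] (· ++ [caption])
  let image_caption_dict := (img_name_vector.zip caption_vector).foldl
    (fun d p => d.modify p.1 [] (fun l => l ++ [p.2])) PySem.Dict.empty
  -- img_names_list.extend([img_name] * num_captions)
  image_caption_dict.items.foldl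
    (fun acc p => acc ++ PySem.List.pyRepeat [p.1] ((p.2.length : Int))) []

-- ===== PORT B =====
def reformat_img_name_vectors_py_alt (caption_filename_tuple : List (String × String)) (caption_vector : List (List Int)) : List String :=
  let pairs := (caption_filename_tuple.map (fun x => x.2)).zip caption_vector
  -- order.setdefault(f, len(order))
  let order := pairs.foldl (fun d p => d.setdefault p.1 ((d.size : Int))) PySem.Dict.empty
  -- order[p[0]] always hits a key that setdefault inserted, so getD's default is never used
  (PySem.List.sorted pairs (fun p => order.getD p.1 0)).map (fun p => p.1)

-- ===== PRECONDITION & SPEC =====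
-- Pre_ excludes exactly the inputs where the final assert fails (AssertionError in both A and B): fewer filename tuples than captions.
def Pre_reformat_img_name_vectors_py (caption_filename_tuple : List (String × String)) (caption_vector : List (List Int)) : Prop :=
  caption_vector.length ≤ caption_filename_tuple.length
instance (caption_filename_tuple : List (String × String)) (caption_vector : List (List Int)) : Decidable (Pre_reformat_img_name_vectors_py caption_filename_tuple caption_vector) := by unfold Pre_reformat_img_name_vectors_py; infer_instance
def pvWitness_reformat_img_name_vectors_py : (List (String × String)) × List (List Int) :=
  ([("c1", "img1.jpg"), ("c2", "img1.jpg"), ("c3", "img2.jpg")], [[1, 2], [3], [4]])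

def Spec_reformat_img_name_vectors_py (caption_filename_tuple : List (String × String)) (caption_vector : List (List Int)) (out : List String) : Prop := out = reformat_img_name_vectors_py_alt caption_filename_tuple caption_vector
instance (caption_filename_tuple : List (String × String)) (caption_vector : List (List Int)) (out : List String) : Decidable (Spec_reformat_img_name_vectors_py caption_filename_tuple caption_vector out) := by unfold Spec_reformat_img_name_vectors_py; infer_instance

-- ===== CLAIM (what is proved, stated in full; the proofs are below) =====
def Claim_equal_reformat_img_name_vectors_py : Prop := ∀ (caption_filename_tuple : List (String × String)) (caption_vector : List (List Int)), Dom_reformat_img_name_vectors_py caption_filename_tuple caption_vector → Pre_reformat_img_name_vectors_py caption_filename_tuple caption_vector → Spec_reformat_img_name_vectors_py caption_filename_tuple caption_vector (reformat_img_name_vectors_py caption_filename_tuple caption_vector)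


-- ===== LEMMAS AND PROOFS =====

-- zip truncates to the shorter list
theorem pv_zip_take {α β : Type} (l1 : List α) (l2 : List β) :
    l1.zip l2 = (l1.take l2.length).zip l2 := by
  induction l2 generalizing l1 with
  | nil => simp
  | cons b t ih => cases l1 with
    | nil => rfl
    | cons a s =>
      simp only [List.length_cons, List.take_succ_cons, List.zip_cons_cons]
      exact congrArg _ (ih s)

theorem pv_map_fst_zip {α β : Type} (l1 : List α) (l2 : List β) (h : l2.length ≤ l1.length) :
    (l1.zip l2).map Prod.fst = l1.take l2.length := by
  rw [pv_zip_take]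
  exact List.map_fst_zip (l₂ := l2) (by simp [h])

-- ordered dedup of an appended element
theorem pv_dedup_append {α : Type} [BEq α] [LawfulBEq α] (ys : List α) (a : α) :
    PySem.List.dedup (ys ++ [a])
      = if a ∈ ys then PySem.List.dedup ys else PySem.List.dedup ys ++ [a] := by
  rw [PySem.List.dedup_eq_ofList, PySem.List.dedup_eq_ofList, PySem.Set.ofList_append]
  show PySem.Set.add (PySem.Set.ofList ys) a = _
  simp only [PySem.Set.add, PySem.Set.contains, List.contains_eq_mem]
  by_cases h : a ∈ ys <;>
    simp [h, ← PySem.List.dedup_eq_ofList, PySem.List.mem_dedup]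

-- the 'order' dict holds each distinct filename with its first-appearance rank
theorem pv_order_items (l : List (String × List Int)) :
    (l.foldl (fun d p => d.setdefault p.1 ((d.size : Int))) PySem.Dict.empty).items
      = (PySem.List.dedup (l.map Prod.fst)).zipIdx.map (fun q => (q.1, (q.2 : Int))) := by
  induction l using List.reverseRecOn with
  | nil => rfl
  | append_singleton l x ih =>
    rw [List.foldl_append, List.foldl_cons, List.foldl_nil]
    set d := l.foldl (fun d p => d.setdefault p.1 ((d.size : Int))) PySem.Dict.empty with hd
    have hkeys : d.keys = PySem.List.dedup (l.map Prod.fst) := by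
      show d.items.map Prod.fst = _
      rw [ih]; simp [List.map_map]
      exact List.zipIdx_map_fst 0 _
    have hcont : d.contains x.1 = decide (x.1 ∈ l.map Prod.fst) := by
      rw [PySem.Dict.contains_eq_decide_mem_keys, hkeys]
      simp
    rw [show (l ++ [x]).map Prod.fst = l.map Prod.fst ++ [x.1] by simp, pv_dedup_append]
    by_cases hx : x.1 ∈ l.map Prod.fst
    · rw [PySem.Dict.setdefault_of_contains _ _ (by simp [hcont, hx]), if_pos hx, ih]
    · rw [PySem.Dict.setdefault_of_not_contains _ _ (by simp [hcont, hx]), if_neg hx]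
      rw [PySem.Dict.items_insert_of_not_contains _ _ (by simp [hcont, hx]), ih]
      have hsz : d.size = (PySem.List.dedup (l.map Prod.fst)).length := by
        show d.items.length = _
        rw [ih]; simp
      rw [List.zipIdx_append, List.map_append, hsz]
      simp

-- insertBy walks past a block it is not 'before'
theorem pv_insertBy_skip {α : Type} (before : α → α → Bool) (x : α) (ys zs : List α)
    (h : ∀ y ∈ ys, before x y = false) :
    PySem.List.insertBy before x (ys ++ zs) = ys ++ PySem.List.insertBy before x zs := by
  induction ys with
  | nil => simp
  | cons y t ih =>
    simp only [List.cons_append, PySem.List.insertBy, h y (by simp)]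
    simp only [Bool.false_eq_true, if_false]
    exact congrArg _ (ih (fun y hy => h y (by simp [hy])))

-- insertBy stops in front of a block it is 'before'
theorem pv_insertBy_head {α : Type} (before : α → α → Bool) (x : α) (zs : List α)
    (h : ∀ y ∈ zs, before x y = true) :
    PySem.List.insertBy before x zs = x :: zs := by
  cases zs with
  | nil => rfl
  | cons z t => simp [PySem.List.insertBy, h z (by simp)]

-- a member of a fiber is in l and has that first component
theorem pv_mem_fiber {l : List (String × List Int)} {f : String} {y : String × List Int}
    (h : y ∈ l.filter (fun p => p.1 == f)) : y ∈ l ∧ y.1 = f := by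
  rw [List.mem_filter] at h
  exact ⟨h.1, by simpa using h.2⟩

theorem pv_flatMap_congr {α β : Type} (L : List α) (f g : α → List β)
    (h : ∀ a ∈ L, f a = g a) : L.flatMap f = L.flatMap g := by
  induction L with
  | nil => rfl
  | cons a t ih =>
    rw [List.flatMap_cons, List.flatMap_cons, h a (by simp),
      ih (fun a ha => h a (by simp [ha]))]

-- the stable sort by a rank strictly increasing along the ordered dedup regroups
-- the pairs into their fibers, in first-appearance order
theorem pv_sorted_grouped (l : List (String × List Int)) (r : String → Int)
    (hp : (PySem.List.dedup (l.map Prod.fst)).Pairwise (fun a b => r a < r b)) :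
    PySem.List.sorted l (fun p => r p.1)
      = (PySem.List.dedup (l.map Prod.fst)).flatMap (fun f => l.filter (fun p => p.1 == f)) := by
  induction l using List.reverseRecOn with
  | nil => rfl
  | append_singleton l x ih =>
    have hmapx : (l ++ [x]).map Prod.fst = l.map Prod.fst ++ [x.1] := by simp
    rw [hmapx, pv_dedup_append] at hp ⊢
    have hsortstep : PySem.List.sorted (l ++ [x]) (fun p => r p.1)
        = PySem.List.insertBy (fun a b => decide (r a.1 < r b.1)) x
            (PySem.List.sorted l (fun p => r p.1)) := by
      rw [PySem.List.sorted_eq_foldl_insertBy, PySem.List.sorted_eq_foldl_insertBy,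
        List.foldl_append, List.foldl_cons, List.foldl_nil]
    set D := PySem.List.dedup (l.map Prod.fst) with hD
    have hDl : ∀ f ∈ D, f ∈ l.map Prod.fst := fun f hf => (PySem.List.mem_dedup _ _).1 hf
    have hfib : ∀ f, x.1 ≠ f → (l ++ [x]).filter (fun p => p.1 == f)
        = l.filter (fun p => p.1 == f) := by
      intro f h
      rw [List.filter_append]
      simp [h]
    by_cases hx : x.1 ∈ l.map Prod.fst
    · rw [if_pos hx] at hp ⊢
      have hxD : x.1 ∈ D := (PySem.List.mem_dedup _ _).2 hx
      obtain ⟨P, S, hPS⟩ := List.append_of_mem hxD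
      have hnd : D.Nodup := PySem.List.nodup_dedup _
      have hndPS := hPS ▸ hnd
      have hpPS := hPS ▸ hp
      have hxP : x.1 ∉ P := fun hm => (List.disjoint_of_nodup_append hndPS) hm (by simp)
      have hPlt : ∀ f ∈ P, r f < r x.1 :=
        fun f hf => (List.pairwise_append.1 hpPS).2.2 f hf x.1 (by simp)
      have hSgt : ∀ f ∈ S, r x.1 < r f :=
        fun f hf => (List.pairwise_cons.1 (List.pairwise_append.1 hpPS).2.1).1 f hf
      have hSx : x.1 ∉ S := fun hm => lt_irrefl _ (hSgt _ hm)
      rw [hsortstep, ih hp, hPS]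
      rw [List.flatMap_append, List.flatMap_cons, List.flatMap_append, List.flatMap_cons]
      rw [pv_flatMap_congr P _ _ (fun f hf => hfib f (fun he => hxP (he ▸ hf))),
          pv_flatMap_congr S _ _ (fun f hf => hfib f (fun he => hSx (he ▸ hf)))]
      have hfibx : (l ++ [x]).filter (fun p => p.1 == x.1)
          = l.filter (fun p => p.1 == x.1) ++ [x] := by
        rw [List.filter_append]; simp
      rw [hfibx, ← List.append_assoc, ← List.append_assoc,
          pv_insertBy_skip _ _ (P.flatMap _ ++ l.filter _)]
      · rw [pv_insertBy_head]
        · simp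
        · intro y hy
          obtain ⟨f, hf, hyf⟩ := List.mem_flatMap.1 hy
          have := (pv_mem_fiber hyf).2
          simp [this, hSgt f hf]
      · intro y hy
        rcases List.mem_append.1 hy with hy | hy
        · obtain ⟨f, hf, hyf⟩ := List.mem_flatMap.1 hy
          have := (pv_mem_fiber hyf).2
          simp [this, not_lt.2 (le_of_lt (hPlt f hf))]
        · have := (pv_mem_fiber hy).2
          simp [this]
    · rw [if_neg hx] at hp ⊢
      have hplt : ∀ f ∈ D, r f < r x.1 :=
        fun f hf => (List.pairwise_append.1 hp).2.2 f hf x.1 (by simp)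
      rw [hsortstep, ih (List.pairwise_append.1 hp).1]
      rw [PySem.List.insertBy_of_forall_not_before]
      · rw [List.flatMap_append, List.flatMap_cons, List.flatMap_nil, List.append_nil]
        rw [pv_flatMap_congr D _ _ (fun f hf => hfib f (fun he => hx (he ▸ hDl f hf)))]
        congr 1
        rw [List.filter_append]
        have : l.filter (fun p => p.1 == x.1) = [] := by
          rw [List.filter_eq_nil_iff]
          intro p hpmem
          simp only [beq_iff_eq]
          exact fun he => hx (he ▸ List.mem_map_of_mem hpmem)
        rw [this]; simp
      · intro y hy
        obtain ⟨f, hf, hyf⟩ := List.mem_flatMap.1 hy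
        have := (pv_mem_fiber hyf).2
        simp [this, not_lt.2 (le_of_lt (hplt f hf))]

-- ===== VERDICT (by name: the statement is the Claim_ definition above) =====
theorem reformat_img_name_vectors_py_spec : Claim_equal_reformat_img_name_vectors_py := by
  intro cft cv _ hpre
  unfold Pre_reformat_img_name_vectors_py at hpre
  unfold Spec_reformat_img_name_vectors_py reformat_img_name_vectors_py reformat_img_name_vectors_py_alt
  simp only []
  set l := ((cft.map (fun x => x.2)).zip cv) with hl
  set ns := (cft.map (fun x => x.2)).take cv.length with hns
  set d := l.foldl (fun d p => d.modify p.1 [] (fun l => l ++ [p.2])) PySem.Dict.empty with hd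
  set ord := l.foldl (fun d p => d.setdefault p.1 ((d.size : Int))) PySem.Dict.empty with hord
  have hfst : l.map Prod.fst = ns := pv_map_fst_zip _ _ (by simpa using hpre)
  -- shared canonical form: dedup ns with each name repeated its multiplicity
  set D := PySem.List.dedup ns with hD
  have hndD : D.Nodup := PySem.List.nodup_dedup _
  have hcnt : ∀ k, (l.filter (fun p => p.1 == k)).length = List.count k ns := by
    intro k
    rw [← hfst, List.count, List.countP_map, ← List.countP_eq_length_filter]
    rfl
  -- A's side (dict of caption lists)
  have hnd : d.keys.Nodup := PySem.Dict.nodup_keys_foldl_modify_key l Prod.fst [] _ _ PySem.Dict.nodup_keys_empty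
  have hk : d.keys = D := by
    rw [hd, PySem.Dict.keys_foldl_modify_key, PySem.Dict.keys_empty, hfst, hD,
      PySem.List.dedup_eq_ofList, PySem.Set.ofList_eq_foldl]
    rfl
  have hg : ∀ k, d.getD k [] = (l.filter (fun p => p.1 == k)).map (fun p => p.2) := by
    intro k
    rw [hd, PySem.Dict.getD_foldl_modify_append, PySem.Dict.getD_empty]
    simp
  have hA : d.items.foldl (fun acc p => acc ++ PySem.List.pyRepeat [p.1] ((p.2.length : Int))) []
      = D.flatMap (fun f => List.replicate (List.count f ns) f) := by
    rw [PySem.List.foldl_append_eq_flatMap, PySem.Dict.items_eq_map_keys d hnd [], hk,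
      List.flatMap_map, List.nil_append]
    refine pv_flatMap_congr _ _ _ (fun f _ => ?_)
    simp only [PySem.List.pyRepeat_singleton, Int.toNat_natCast, hg, List.length_map, hcnt]
  -- B's side (rank + stable sort)
  have hDl : PySem.List.dedup (l.map Prod.fst) = D := by rw [hfst]
  have hrank : ∀ i (hi : i < D.length), ord.getD D[i] 0 = (i : Int) := by
    intro i hi
    have hitems : (D[i], (i : Int)) ∈ ord.items := by
      rw [hord, pv_order_items, hDl]
      refine List.mem_map.2 ⟨(D[i], i), ?_, rfl⟩
      have h2 : i < D.zipIdx.length := by simpa using hi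
      have := List.getElem_mem h2
      rwa [List.getElem_zipIdx, Nat.zero_add] at this
    have hok : ord.keys.Nodup := by
      have : ord.keys = D := by
        show ord.items.map Prod.fst = D
        rw [hord, pv_order_items, hDl]
        simp [List.map_map]
        exact List.zipIdx_map_fst 0 _
      rw [this]; exact hndD
    exact PySem.Dict.getD_of_mem_items _ hitems hok 0
  have hpD : (PySem.List.dedup (l.map Prod.fst)).Pairwise (fun a b => ord.getD a 0 < ord.getD b 0) := by
    rw [hDl]
    rw [List.pairwise_iff_getElem]
    intro i j hi hj hij
    rw [hrank i hi, hrank j hj]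
    exact_mod_cast hij
  have hB : (PySem.List.sorted l (fun p => ord.getD p.1 0)).map (fun p => p.1)
      = D.flatMap (fun f => List.replicate (List.count f ns) f) := by
    rw [pv_sorted_grouped l _ hpD, hDl, List.map_flatMap]
    refine pv_flatMap_congr _ _ _ (fun f _ => ?_)
    rw [List.eq_replicate_iff]
    constructor
    · rw [List.length_map]; exact hcnt f
    · intro b hb
      obtain ⟨p, hpmem, hpe⟩ := List.mem_map.1 hb
      exact hpe ▸ (pv_mem_fiber hpmem).2
  rw [hA, hB]
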